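-- pv_equiv track=rewrite | github.com/vhsw/CodeMasters_Tourney | Python 3/chessBoardSquaresUnderQueenAttack.py | chessBoardSquaresUnderQueenAttack
-- ===== SOURCE A (Python) =====
-- def chessBoardSquaresUnderQueenAttack(a, b):
--
--     def go(x, y, dx, dy):
--         if x < 0 or x >= a or y < 0 or y >= b:
--             return 0
--         return go(x + dx, y + dy, dx, dy) + 1
--
--     res = 0
--
--     for i in range(a):
--         for j in range(b):
--             for dx in range(-1, 2):
--                 for dy in range(-1, 2):
--                     if dx != 0 or dy != 0:
--                         res += go(i + dx, j + dy, dx, dy)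
--
--     return res
-- ===== SOURCE B (Python) =====
-- def chessBoardSquaresUnderQueenAttack(a, b):
--     res = 0
--     for i in range(a):
--         for j in range(b):
--             res += (a - 1) + (b - 1)
--             res += (min(i, j) + min(i, b - 1 - j)
--                     + min(a - 1 - i, j) + min(a - 1 - i, b - 1 - j))
--     return res
-- ===== Notes on version B (the rewrite author's own statement) =====
-- stated objective: faster
-- what changed: Replaces the per-direction recursive edge-walk (8 recursive walks per cell, each up to max(a,b) steps) with a closed-form distance-to-edge expression per cell, removing the direction loops and the recursion entirely. Pre_ excludes only boards with a side over 998, on which A raises RecursionError.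
import Mathlib
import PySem

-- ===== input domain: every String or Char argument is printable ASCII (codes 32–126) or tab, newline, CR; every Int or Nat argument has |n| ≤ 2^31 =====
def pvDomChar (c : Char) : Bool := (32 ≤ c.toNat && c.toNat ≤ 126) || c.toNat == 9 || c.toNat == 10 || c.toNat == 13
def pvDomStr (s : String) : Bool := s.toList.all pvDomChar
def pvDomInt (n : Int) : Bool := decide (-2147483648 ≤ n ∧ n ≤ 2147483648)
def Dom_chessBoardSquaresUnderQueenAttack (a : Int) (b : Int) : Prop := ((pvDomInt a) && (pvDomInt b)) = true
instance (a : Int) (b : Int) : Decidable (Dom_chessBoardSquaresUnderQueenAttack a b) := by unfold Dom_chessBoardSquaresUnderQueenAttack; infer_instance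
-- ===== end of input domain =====

-- B drops the recursive per-direction edge walk for a closed-form distance-to-edge sum per cell (objective: faster, O(a*b) vs O(a*b*max(a,b))).

-- ===== PORT A =====
-- inner 'def go': literal recursion, made total with a fuel guard (fuel is always large enough; see goA_eq below)
def goA (a b : Int) : Nat → Int → Int → Int → Int → Int
  | 0, _, _, _, _ => 0
  | f + 1, x, y, dx, dy =>
    if x < 0 ∨ x ≥ a ∨ y < 0 ∨ y ≥ b then 0
    else goA a b f (x + dx) (y + dy) dx dy + 1

def chessBoardSquaresUnderQueenAttack (a : Int) (b : Int) : Int :=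
  (PySem.List.pyRange 0 a 1).foldl (fun res i =>
    (PySem.List.pyRange 0 b 1).foldl (fun res j =>
      (PySem.List.pyRange (-1) 2 1).foldl (fun res dx =>
        (PySem.List.pyRange (-1) 2 1).foldl (fun res dy =>
          if dx ≠ 0 ∨ dy ≠ 0 then
            res + goA a b (a.toNat + b.toNat + 1) (i + dx) (j + dy) dx dy
          else res) res) res) res) 0

-- ===== PORT B =====
def chessBoardSquaresUnderQueenAttack_alt (a : Int) (b : Int) : Int :=
  (PySem.List.pyRange 0 a 1).foldl (fun res i =>
    (PySem.List.pyRange 0 b 1).foldl (fun res j =>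
      res + ((a - 1) + (b - 1)) +
        (min i j + min i (b - 1 - j) + min (a - 1 - i) j + min (a - 1 - i) (b - 1 - j))) res) 0

-- ===== PRECONDITION & SPEC =====
-- Pre_ excludes exactly the inputs on which A raises: on a non-empty board (both sides ≥ 1)
-- with a side over 998, A's recursive 'go' reaches depth max(a,b) on the longest edge walk and
-- CPython's default recursion limit (1000) makes it raise RecursionError; everywhere else
-- (any side ≤ 0, or both sides ≤ 998) A returns normally.
def Pre_chessBoardSquaresUnderQueenAttack (a : Int) (b : Int) : Prop := a ≤ 0 ∨ b ≤ 0 ∨ (a ≤ 998 ∧ b ≤ 998)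
instance (a : Int) (b : Int) : Decidable (Pre_chessBoardSquaresUnderQueenAttack a b) := by unfold Pre_chessBoardSquaresUnderQueenAttack; infer_instance
def pvWitness_chessBoardSquaresUnderQueenAttack : Int × Int := (3, 3)
def Spec_chessBoardSquaresUnderQueenAttack (a : Int) (b : Int) (out : Int) : Prop := out = chessBoardSquaresUnderQueenAttack_alt a b
instance (a : Int) (b : Int) (out : Int) : Decidable (Spec_chessBoardSquaresUnderQueenAttack a b out) := by unfold Spec_chessBoardSquaresUnderQueenAttack; infer_instance

-- ===== CLAIM (what is proved, stated in full; the proofs are below) =====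
def Claim_equal_chessBoardSquaresUnderQueenAttack : Prop := ∀ (a : Int) (b : Int), Dom_chessBoardSquaresUnderQueenAttack a b → Pre_chessBoardSquaresUnderQueenAttack a b → Spec_chessBoardSquaresUnderQueenAttack a b (chessBoardSquaresUnderQueenAttack a b)

-- ===== LEMMAS AND PROOFS =====

-- go walks exactly N steps: all positions before step N in bounds, position N out of bounds
theorem goA_eq (a b dx dy : Int) (N : Nat) :
    ∀ (f : Nat) (x y : Int), N < f →
    (∀ k : Nat, k < N → 0 ≤ x + k * dx ∧ x + k * dx < a ∧ 0 ≤ y + k * dy ∧ y + k * dy < b) →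
    (x + N * dx < 0 ∨ a ≤ x + N * dx ∨ y + N * dy < 0 ∨ b ≤ y + N * dy) →
    goA a b f x y dx dy = N := by
  induction N with
  | zero =>
    intro f x y hf hin hout
    obtain ⟨f, rfl⟩ : ∃ f', f = f' + 1 := ⟨f - 1, by omega⟩
    simp only [Nat.cast_zero, zero_mul, add_zero] at hout
    simp [goA, hout.imp_right (fun h => by omega)]
  | succ N ih =>
    intro f x y hf hin hout
    obtain ⟨f, rfl⟩ : ∃ f', f = f' + 1 := ⟨f - 1, by omega⟩
    have h0 := hin 0 (by omega)
    simp only [Nat.cast_zero, zero_mul, add_zero] at h0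
    simp only [goA]
    rw [if_neg (by omega)]
    rw [ih f (x + dx) (y + dy) (by omega)
      (fun k hk => by
        have := hin (k + 1) (by omega)
        push_cast at this ⊢
        constructor
        · nlinarith [this.1]
        constructor
        · nlinarith [this.2.1]
        constructor
        · nlinarith [this.2.2.1]
        · nlinarith [this.2.2.2])
      (by push_cast at hout ⊢; rcases hout with h | h | h | h
          · left; nlinarith
          · right; left; nlinarith
          · right; right; left; nlinarith
          · right; right; right; nlinarith)]
    push_cast
    ring

-- per-cell: the eight walks evaluated in closed form
theorem goA_val (a b i j : Int) (dx dy : Int) (v : Int) (hv : 0 ≤ v)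
    (hin : ∀ k : Nat, (k : Int) < v → 0 ≤ i + dx + k * dx ∧ i + dx + k * dx < a ∧ 0 ≤ j + dy + k * dy ∧ j + dy + k * dy < b)
    (hout : i + dx + v * dx < 0 ∨ a ≤ i + dx + v * dx ∨ j + dy + v * dy < 0 ∨ b ≤ j + dy + v * dy)
    (hsmall : v < a + b) :
    goA a b (a.toNat + b.toNat + 1) (i + dx) (j + dy) dx dy = v := by
  have h := goA_eq a b dx dy v.toNat (a.toNat + b.toNat + 1) (i + dx) (j + dy)
    (by omega)
    (fun k hk => hin k (by omega))
    (by rw [show ((v.toNat : Int)) = v by omega]; exact hout)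
  rw [h]; omega

theorem cell_sum (a b i j : Int) (hi : 0 ≤ i) (hia : i < a) (hj : 0 ≤ j) (hjb : j < b)
    (res : Int) :
    (PySem.List.pyRange (-1) 2 1).foldl (fun res dx =>
        (PySem.List.pyRange (-1) 2 1).foldl (fun res dy =>
          if dx ≠ 0 ∨ dy ≠ 0 then
            res + goA a b (a.toNat + b.toNat + 1) (i + dx) (j + dy) dx dy
          else res) res) res
    = res + ((a - 1) + (b - 1)) +
        (min i j + min i (b - 1 - j) + min (a - 1 - i) j + min (a - 1 - i) (b - 1 - j)) := by
  have hr : PySem.List.pyRange (-1) 2 1 = [-1, 0, 1] := by decide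
  have hmm : goA a b (a.toNat + b.toNat + 1) (i + -1) (j + -1) (-1) (-1) = min i j := by
    exact goA_val a b i j (-1) (-1) (min i j) (by omega)
      (fun k hk => by omega) (by omega) (by omega)
  have hmz : goA a b (a.toNat + b.toNat + 1) (i + -1) j (-1) 0 = i := by
    simpa using goA_val a b i j (-1) 0 i hi
      (fun k hk => by omega) (by omega) (by omega)
  have hmp : goA a b (a.toNat + b.toNat + 1) (i + -1) (j + 1) (-1) 1 = min i (b - 1 - j) := by
    exact goA_val a b i j (-1) 1 (min i (b - 1 - j)) (by omega)
      (fun k hk => by omega) (by omega) (by omega)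
  have hzm : goA a b (a.toNat + b.toNat + 1) i (j + -1) 0 (-1) = j := by
    simpa using goA_val a b i j 0 (-1) j hj
      (fun k hk => by omega) (by omega) (by omega)
  have hzp : goA a b (a.toNat + b.toNat + 1) i (j + 1) 0 1 = b - 1 - j := by
    simpa using goA_val a b i j 0 1 (b - 1 - j) (by omega)
      (fun k hk => by omega) (by omega) (by omega)
  have hpm : goA a b (a.toNat + b.toNat + 1) (i + 1) (j + -1) 1 (-1) = min (a - 1 - i) j := by
    exact goA_val a b i j 1 (-1) (min (a - 1 - i) j) (by omega)
      (fun k hk => by omega) (by omega) (by omega)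
  have hpz : goA a b (a.toNat + b.toNat + 1) (i + 1) j 1 0 = a - 1 - i := by
    simpa using goA_val a b i j 1 0 (a - 1 - i) (by omega)
      (fun k hk => by omega) (by omega) (by omega)
  have hpp : goA a b (a.toNat + b.toNat + 1) (i + 1) (j + 1) 1 1 = min (a - 1 - i) (b - 1 - j) := by
    exact goA_val a b i j 1 1 (min (a - 1 - i) (b - 1 - j)) (by omega)
      (fun k hk => by omega) (by omega) (by omega)
  rw [hr]
  simp only [List.foldl]
  norm_num
  rw [hmm, hmz, hmp, hzm, hzp, hpm, hpz, hpp]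
  omega

-- ===== VERDICT (by name: the statement is the Claim_ definition above) =====
theorem chessBoardSquaresUnderQueenAttack_spec : Claim_equal_chessBoardSquaresUnderQueenAttack := by
  intro a b _ _
  unfold Spec_chessBoardSquaresUnderQueenAttack
  unfold chessBoardSquaresUnderQueenAttack chessBoardSquaresUnderQueenAttack_alt
  apply PySem.List.foldl_congr_mem
  intro acc i hi
  apply PySem.List.foldl_congr_mem
  intro acc2 j hj
  rw [PySem.List.mem_pyRange_one] at hi hj
  exact cell_sum a b i j hi.1 hi.2 hj.1 hj.2 acc2
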